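-- pv_equiv track=rewrite | github.com/SteveT7321/100_applications_with_drones | src/02_logistics_delivery/3d/s029_3d_urban_logistics.py | assign_routes_to_drones
-- ===== SOURCE A (Python) =====
-- N_DEPOTS    = 3
--
-- N_DRONES    = 6           # 2 per depot
--
-- def assign_routes_to_drones(routes, route_depot):
--     """Distribute routes across N_DRONES (2 per depot); balance load."""
--     drone_routes = [[] for _ in range(N_DRONES)]  # drone k gets a list of routes
--     depot_queue  = {d: [2*d, 2*d+1] for d in range(N_DEPOTS)}  # 2 drones per depot
--     depot_load   = {d: [0, 0] for d in range(N_DEPOTS)}         # route count per drone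
--
--     for route, depot_idx in zip(routes, route_depot):
--         drones = depot_queue[depot_idx]
--         loads  = depot_load[depot_idx]
--         # Pick the less loaded drone
--         pick = 0 if loads[0] <= loads[1] else 1
--         drone_idx = drones[pick]
--         drone_routes[drone_idx].append(route)
--         loads[pick] += len(route)
--
--     # Flatten: each drone executes its routes sequentially
--     flat = []
--     for k in range(N_DRONES):
--         seq = []
--         for r in drone_routes[k]:
--             seq.extend(r)
--         flat.append(seq)
--     return flat, [k // 2 for k in range(N_DRONES)]  # drone k belongs to depot k//2
-- ===== SOURCE B (Python) =====
-- N_DEPOTS = 3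
--
-- N_DRONES = 6
--
--
-- def assign_routes_to_drones(routes, route_depot):
--     """Group routes per depot first, then run each depot's two-drone greedy,
--     flattening each drone's sequence as it is built."""
--     groups = {d: [] for d in range(N_DEPOTS)}
--     for route, depot in zip(routes, route_depot):
--         groups[depot].append(route)  # KeyError on unknown depot, like A
--
--     flat = []
--     for d in range(N_DEPOTS):
--         seq0, seq1 = [], []
--         l0 = l1 = 0
--         for r in groups[d]:
--             if l0 <= l1:
--                 seq0.extend(r)
--                 l0 += len(r)
--             else:
--                 seq1.extend(r)
--                 l1 += len(r)
--         flat.append(seq0)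
--         flat.append(seq1)
--     return flat, [k // 2 for k in range(N_DRONES)]
-- ===== Notes on version B (the rewrite author's own statement) =====
-- stated objective: alternative
-- what changed: A interleaves one pass over zip(routes, route_depot) updating dict-held per-depot load lists and a global 6-slot drone_routes table, then flattens in a separate nested pass; B first builds a per-depot index in one grouping pass, then runs each depot's two-drone greedy independently with local accumulators, flattening each drone's sequence immediately as routes are assigned.
import Mathlib
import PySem

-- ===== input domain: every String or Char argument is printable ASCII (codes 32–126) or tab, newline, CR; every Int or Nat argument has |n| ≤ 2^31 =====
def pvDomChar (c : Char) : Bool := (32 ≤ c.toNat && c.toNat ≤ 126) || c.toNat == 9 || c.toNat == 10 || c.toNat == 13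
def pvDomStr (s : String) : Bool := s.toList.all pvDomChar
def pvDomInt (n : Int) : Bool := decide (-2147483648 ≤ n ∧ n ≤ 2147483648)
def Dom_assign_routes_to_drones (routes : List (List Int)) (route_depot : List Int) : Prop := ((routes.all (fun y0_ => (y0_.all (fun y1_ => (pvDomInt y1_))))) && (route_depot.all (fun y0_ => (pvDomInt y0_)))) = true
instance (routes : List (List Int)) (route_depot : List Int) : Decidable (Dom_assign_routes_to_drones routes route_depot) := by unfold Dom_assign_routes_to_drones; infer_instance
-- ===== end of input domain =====

-- B groups routes per depot first and runs each depot's two-drone greedy with local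
-- accumulators, flattening immediately; A interleaves one pass over the zip with
-- dict-held loads and flattens in a separate nested pass. Objective: alternative.

-- ===== PORT A =====
-- depot_queue = {d: [2*d, 2*d+1] for d in range(N_DEPOTS)} (never mutated)
def aQueue : PySem.Dict Int (List Int) :=
  (PySem.List.pyRange 0 3 1).foldl (fun d k => d.insert k [2*k, 2*k+1]) PySem.Dict.empty

-- the body of A's main loop (drone_routes, depot_load as the mutable state)
def aStep (st : List (List (List Int)) × PySem.Dict Int (List Int)) (p : List Int × Int) :
    List (List (List Int)) × PySem.Dict Int (List Int) :=
  let drones := aQueue.getD p.2 []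
  let loads := st.2.getD p.2 []
  let pick : Int := if PySem.List.pyGetD loads 0 0 ≤ PySem.List.pyGetD loads 1 0 then 0 else 1
  let drone_idx := PySem.List.pyGetD drones pick 0
  let drone_routes := PySem.List.pySetD st.1 drone_idx
      (PySem.List.pyGetD st.1 drone_idx [] ++ [p.1])
  let depot_load := st.2.insert p.2
      (PySem.List.pySetD loads pick (PySem.List.pyGetD loads pick 0 + (p.1.length : Int)))
  (drone_routes, depot_load)

def assign_routes_to_drones (routes : List (List Int)) (route_depot : List Int) :
    List (List Int) × List Int :=
  let drone_routes : List (List (List Int)) := (PySem.List.pyRange 0 6 1).map (fun _ => [])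
  let depot_load : PySem.Dict Int (List Int) :=
    (PySem.List.pyRange 0 3 1).foldl (fun d k => d.insert k [0, 0]) PySem.Dict.empty
  let st := (routes.zip route_depot).foldl aStep (drone_routes, depot_load)
  let flat := (PySem.List.pyRange 0 6 1).foldl (fun flat k =>
      let seq := (PySem.List.pyGetD st.1 k []).foldl (fun seq r => seq ++ r) []
      flat ++ [seq]) []
  (flat, (PySem.List.pyRange 0 6 1).map (fun k => PySem.Int.floordiv k 2))

-- ===== PORT B =====
-- the body of B's per-depot greedy loop (seq0, seq1, l0, l1 as the state)
def bStep (st : List Int × List Int × Int × Int) (r : List Int) :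
    List Int × List Int × Int × Int :=
  if st.2.2.1 ≤ st.2.2.2 then (st.1 ++ r, st.2.1, st.2.2.1 + (r.length : Int), st.2.2.2)
  else (st.1, st.2.1 ++ r, st.2.2.1, st.2.2.2 + (r.length : Int))

def assign_routes_to_drones_alt (routes : List (List Int)) (route_depot : List Int) :
    List (List Int) × List Int :=
  let groups0 : PySem.Dict Int (List (List Int)) :=
    (PySem.List.pyRange 0 3 1).foldl (fun d k => d.insert k []) PySem.Dict.empty
  let groups := (routes.zip route_depot).foldl
    (fun g p => g.modify p.2 [] (· ++ [p.1])) groups0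
  let flat := (PySem.List.pyRange 0 3 1).foldl (fun flat d =>
      let res := (groups.getD d []).foldl bStep ([], [], 0, 0)
      flat ++ [res.1] ++ [res.2.1]) []
  (flat, (PySem.List.pyRange 0 6 1).map (fun k => PySem.Int.floordiv k 2))

-- ===== PRECONDITION & SPEC =====
-- Pre_ excludes exactly the inputs with a depot index outside {0,1,2} among the
-- zipped prefix, on which A raises KeyError (and B raises KeyError too).
def Pre_assign_routes_to_drones (routes : List (List Int)) (route_depot : List Int) : Prop :=
  ∀ p ∈ routes.zip route_depot, p.2 = 0 ∨ p.2 = 1 ∨ p.2 = 2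
instance (routes : List (List Int)) (route_depot : List Int) :
    Decidable (Pre_assign_routes_to_drones routes route_depot) := by
  unfold Pre_assign_routes_to_drones; infer_instance
def pvWitness_assign_routes_to_drones : List (List Int) × List Int :=
  ([[1, 2], [3], [4, 5, 6]], [0, 1, 0])

def Spec_assign_routes_to_drones (routes : List (List Int)) (route_depot : List Int)
    (out : List (List Int) × List Int) : Prop := out = assign_routes_to_drones_alt routes route_depot
instance (routes : List (List Int)) (route_depot : List Int) (out : List (List Int) × List Int) :
    Decidable (Spec_assign_routes_to_drones routes route_depot out) := by
  unfold Spec_assign_routes_to_drones; infer_instance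

-- ===== CLAIM (what is proved, stated in full; the proofs are below) =====
def Claim_equal_assign_routes_to_drones : Prop := ∀ (routes : List (List Int)) (route_depot : List Int), Dom_assign_routes_to_drones routes route_depot → Pre_assign_routes_to_drones routes route_depot → Spec_assign_routes_to_drones routes route_depot (assign_routes_to_drones routes route_depot)

-- ===== LEMMAS AND PROOFS =====

-- the common greedy: routes of one depot split between its two drones, with final loads
def G (l0 l1 : Int) : List (List Int) → List (List Int) × List (List Int) × Int × Int
  | [] => ([], [], l0, l1)
  | r :: rs =>
    if l0 ≤ l1 then
      let p := G (l0 + (r.length : Int)) l1 rs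
      (r :: p.1, p.2.1, p.2.2.1, p.2.2.2)
    else
      let p := G l0 (l1 + (r.length : Int)) rs
      (p.1, r :: p.2.1, p.2.2.1, p.2.2.2)

-- routes of depot d, in order
def F (d : Int) (l : List (List Int × Int)) : List (List Int) :=
  (l.filter (fun p => p.2 == d)).map (·.1)

theorem F_cons (d : Int) (p : List Int × Int) (l : List (List Int × Int)) :
    F d (p :: l) = if p.2 == d then p.1 :: F d l else F d l := by
  simp only [F, List.filter_cons]
  split <;> simp_all

theorem witness_pre : Dom_assign_routes_to_drones pvWitness_assign_routes_to_drones.1 pvWitness_assign_routes_to_drones.2 ∧ Pre_assign_routes_to_drones pvWitness_assign_routes_to_drones.1 pvWitness_assign_routes_to_drones.2 := by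
  constructor <;> decide

theorem foldl_append_acc (xs : List (List Int)) (acc : List Int) :
    xs.foldl (fun s r => s ++ r) acc = acc ++ xs.flatten := by
  induction xs generalizing acc with
  | nil => simp
  | cons x xs ih => simp [ih, List.append_assoc]

-- A's main loop, characterised by G on the per-depot filters
theorem aFold (l : List (List Int × Int)) (h : ∀ p ∈ l, p.2 = 0 ∨ p.2 = 1 ∨ p.2 = 2)
    (a0 a1 a2 a3 a4 a5 : List (List Int)) (la0 la1 lb0 lb1 lc0 lc1 : Int) :
    l.foldl aStep ([a0, a1, a2, a3, a4, a5],
        PySem.Dict.mk [(0, [la0, la1]), (1, [lb0, lb1]), (2, [lc0, lc1])]) =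
      ([a0 ++ (G la0 la1 (F 0 l)).1, a1 ++ (G la0 la1 (F 0 l)).2.1,
        a2 ++ (G lb0 lb1 (F 1 l)).1, a3 ++ (G lb0 lb1 (F 1 l)).2.1,
        a4 ++ (G lc0 lc1 (F 2 l)).1, a5 ++ (G lc0 lc1 (F 2 l)).2.1],
       PySem.Dict.mk [(0, [(G la0 la1 (F 0 l)).2.2.1, (G la0 la1 (F 0 l)).2.2.2]),
                      (1, [(G lb0 lb1 (F 1 l)).2.2.1, (G lb0 lb1 (F 1 l)).2.2.2]),
                      (2, [(G lc0 lc1 (F 2 l)).2.2.1, (G lc0 lc1 (F 2 l)).2.2.2])]) := by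
  induction l generalizing a0 a1 a2 a3 a4 a5 la0 la1 lb0 lb1 lc0 lc1 with
  | nil => simp [F, G]
  | cons p rest ih =>
    have hrest : ∀ q ∈ rest, q.2 = 0 ∨ q.2 = 1 ∨ q.2 = 2 := fun q hq => h q (by simp [hq])
    rcases h p (by simp) with hd | hd | hd
    · by_cases hle : la0 ≤ la1
      · have hstep : aStep ([a0, a1, a2, a3, a4, a5],
            PySem.Dict.mk [(0, [la0, la1]), (1, [lb0, lb1]), (2, [lc0, lc1])]) p =
            ([a0 ++ [p.1], a1, a2, a3, a4, a5],
             PySem.Dict.mk [(0, [la0 + (p.1.length : Int), la1]), (1, [lb0, lb1]), (2, [lc0, lc1])]) := by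
          simp only [aStep, hd, show aQueue.getD (0:Int) [] = [0, 1] from by decide]
          simp [PySem.Dict.getD, PySem.Dict.get?_mk_cons, PySem.List.pyGetD, hle,
                PySem.List.pySetD, PySem.List.pySet?, PySem.List.pyIdx?, PySem.Dict.insert]
        rw [List.foldl_cons, hstep, ih hrest]
        simp [F_cons, hd, G, hle, List.append_assoc]
      · have hstep : aStep ([a0, a1, a2, a3, a4, a5],
            PySem.Dict.mk [(0, [la0, la1]), (1, [lb0, lb1]), (2, [lc0, lc1])]) p =
            ([a0, a1 ++ [p.1], a2, a3, a4, a5],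
             PySem.Dict.mk [(0, [la0, la1 + (p.1.length : Int)]), (1, [lb0, lb1]), (2, [lc0, lc1])]) := by
          simp only [aStep, hd, show aQueue.getD (0:Int) [] = [0, 1] from by decide]
          simp [PySem.Dict.getD, PySem.Dict.get?_mk_cons, PySem.List.pyGetD, hle,
                PySem.List.pySetD, PySem.List.pySet?, PySem.List.pyIdx?, PySem.Dict.insert]
        rw [List.foldl_cons, hstep, ih hrest]
        simp [F_cons, hd, G, hle, List.append_assoc]
    · by_cases hle : lb0 ≤ lb1
      · have hstep : aStep ([a0, a1, a2, a3, a4, a5],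
            PySem.Dict.mk [(0, [la0, la1]), (1, [lb0, lb1]), (2, [lc0, lc1])]) p =
            ([a0, a1, a2 ++ [p.1], a3, a4, a5],
             PySem.Dict.mk [(0, [la0, la1]), (1, [lb0 + (p.1.length : Int), lb1]), (2, [lc0, lc1])]) := by
          simp only [aStep, hd, show aQueue.getD (1:Int) [] = [2, 3] from by decide]
          simp [PySem.Dict.getD, PySem.Dict.get?_mk_cons, PySem.List.pyGetD, hle,
                PySem.List.pySetD, PySem.List.pySet?, PySem.List.pyIdx?, PySem.Dict.insert]
        rw [List.foldl_cons, hstep, ih hrest]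
        simp [F_cons, hd, G, hle, List.append_assoc]
      · have hstep : aStep ([a0, a1, a2, a3, a4, a5],
            PySem.Dict.mk [(0, [la0, la1]), (1, [lb0, lb1]), (2, [lc0, lc1])]) p =
            ([a0, a1, a2, a3 ++ [p.1], a4, a5],
             PySem.Dict.mk [(0, [la0, la1]), (1, [lb0, lb1 + (p.1.length : Int)]), (2, [lc0, lc1])]) := by
          simp only [aStep, hd, show aQueue.getD (1:Int) [] = [2, 3] from by decide]
          simp [PySem.Dict.getD, PySem.Dict.get?_mk_cons, PySem.List.pyGetD, hle,
                PySem.List.pySetD, PySem.List.pySet?, PySem.List.pyIdx?, PySem.Dict.insert]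
        rw [List.foldl_cons, hstep, ih hrest]
        simp [F_cons, hd, G, hle, List.append_assoc]
    · by_cases hle : lc0 ≤ lc1
      · have hstep : aStep ([a0, a1, a2, a3, a4, a5],
            PySem.Dict.mk [(0, [la0, la1]), (1, [lb0, lb1]), (2, [lc0, lc1])]) p =
            ([a0, a1, a2, a3, a4 ++ [p.1], a5],
             PySem.Dict.mk [(0, [la0, la1]), (1, [lb0, lb1]), (2, [lc0 + (p.1.length : Int), lc1])]) := by
          simp only [aStep, hd, show aQueue.getD (2:Int) [] = [4, 5] from by decide]
          simp [PySem.Dict.getD, PySem.Dict.get?_mk_cons, PySem.List.pyGetD, hle,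
                PySem.List.pySetD, PySem.List.pySet?, PySem.List.pyIdx?, PySem.Dict.insert]
        rw [List.foldl_cons, hstep, ih hrest]
        simp [F_cons, hd, G, hle, List.append_assoc]
      · have hstep : aStep ([a0, a1, a2, a3, a4, a5],
            PySem.Dict.mk [(0, [la0, la1]), (1, [lb0, lb1]), (2, [lc0, lc1])]) p =
            ([a0, a1, a2, a3, a4, a5 ++ [p.1]],
             PySem.Dict.mk [(0, [la0, la1]), (1, [lb0, lb1]), (2, [lc0, lc1 + (p.1.length : Int)])]) := by
          simp only [aStep, hd, show aQueue.getD (2:Int) [] = [4, 5] from by decide]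
          simp [PySem.Dict.getD, PySem.Dict.get?_mk_cons, PySem.List.pyGetD, hle,
                PySem.List.pySetD, PySem.List.pySet?, PySem.List.pyIdx?, PySem.Dict.insert]
        rw [List.foldl_cons, hstep, ih hrest]
        simp [F_cons, hd, G, hle, List.append_assoc]

theorem bGroupGetD (l : List (List Int × Int)) (g : PySem.Dict Int (List (List Int))) (c : Int) :
    (l.foldl (fun g p => g.modify p.2 [] (· ++ [p.1])) g).getD c [] = g.getD c [] ++ F c l := by
  induction l generalizing g with
  | nil => simp [F]
  | cons p rest ih =>
    simp only [List.foldl_cons, ih, F_cons]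
    rw [PySem.Dict.getD_modify]
    by_cases hc : c = p.2
    · simp [hc, List.append_assoc]
    · simp [hc]; omega

theorem bFold (rs : List (List Int)) (s0 s1 : List Int) (l0 l1 : Int) :
    rs.foldl bStep (s0, s1, l0, l1) =
      (s0 ++ (G l0 l1 rs).1.flatten, s1 ++ (G l0 l1 rs).2.1.flatten,
       (G l0 l1 rs).2.2.1, (G l0 l1 rs).2.2.2) := by
  induction rs generalizing s0 s1 l0 l1 with
  | nil => simp [G]
  | cons r rs ih =>
    simp only [List.foldl_cons, bStep, G]
    split <;> simp [ih, List.append_assoc]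

-- ===== VERDICT (by name: the statement is the Claim_ definition above) =====
theorem assign_routes_to_drones_spec : Claim_equal_assign_routes_to_drones := by
  intro routes route_depot _ hpre
  unfold Spec_assign_routes_to_drones assign_routes_to_drones assign_routes_to_drones_alt
  have hinitA : ((PySem.List.pyRange 0 6 1).map (fun _ => ([] : List (List Int))),
      (PySem.List.pyRange 0 3 1).foldl (fun d k => d.insert k [0, 0]) PySem.Dict.empty) =
      (([[], [], [], [], [], []] : List (List (List Int))),
       PySem.Dict.mk [((0:Int), [(0:Int), 0]), (1, [0, 0]), (2, [0, 0])]) := by decide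
  have hinitB : ((PySem.List.pyRange 0 3 1).foldl (fun d k => d.insert k [])
        PySem.Dict.empty : PySem.Dict Int (List (List Int))) =
      PySem.Dict.mk [((0:Int), []), (1, []), (2, [])] := by decide
  dsimp only
  rw [hinitB, hinitA, aFold (routes.zip route_depot) hpre]
  simp only [show PySem.List.pyRange 0 6 1 = [0, 1, 2, 3, 4, 5] from by decide,
    show PySem.List.pyRange 0 3 1 = [0, 1, 2] from by decide,
    List.foldl_cons, List.foldl_nil, bGroupGetD, bFold]
  simp [PySem.List.pyGetD, PySem.Dict.getD, PySem.Dict.get?_mk_cons, foldl_append_acc]
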